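-- pv_equiv track=rewrite | github.com/TyeKates27/CAP4630-001_AI-LevelGen | ai-levelgen/src/evaluate.py | simple_rule_playability
-- ===== SOURCE A (Python) =====
-- def simple_rule_playability(text, tile_set, width):
--     # Check rows are same width and there is at least one solid ground 'X' per column.
--     rows = [r for r in text.splitlines() if r.strip()!=""]
--     ok_width = all(len(r)==width for r in rows)
--     if not ok_width: return False, "inconsistent width"
--     for col in range(width):
--         col_tiles = [rows[r][col] for r in range(len(rows))]
--         if 'X' not in col_tiles:
--             return False, f"no ground in column {col}"
--     whitelist = set(tile_set)
--     for ch in "".join(rows):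
--         if ch not in whitelist:
--             return False, f"unknown tile '{ch}'"
--     return True, "pass"
-- ===== SOURCE B (Python) =====
-- def simple_rule_playability(text, tile_set, width):
--     # One fused row-major pass: collects ground columns and the first unknown
--     # tile while checking widths, instead of A's per-column scans.
--     whitelist = set(tile_set)
--     ground_cols = set()
--     bad_tile = None
--     for r in text.splitlines():
--         if r.strip() == "":
--             continue
--         if len(r) != width:
--             return False, "inconsistent width"
--         for c, ch in enumerate(r):
--             if ch == 'X':
--                 ground_cols.add(c)
--             if bad_tile is None and ch not in whitelist:
--                 bad_tile = ch
--     for col in range(width):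
--         if col not in ground_cols:
--             return False, f"no ground in column {col}"
--     if bad_tile is not None:
--         return False, f"unknown tile '{bad_tile}'"
--     return True, "pass"
-- ===== Notes on version B (the rewrite author's own statement) =====
-- stated objective: alternative
-- what changed: A rescans the grid once per column to look for ground and then walks the joined string; B makes one fused row-major pass that records the set of ground columns and the first unknown tile while checking widths, then answers the three checks from that pass.
import Mathlib
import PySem

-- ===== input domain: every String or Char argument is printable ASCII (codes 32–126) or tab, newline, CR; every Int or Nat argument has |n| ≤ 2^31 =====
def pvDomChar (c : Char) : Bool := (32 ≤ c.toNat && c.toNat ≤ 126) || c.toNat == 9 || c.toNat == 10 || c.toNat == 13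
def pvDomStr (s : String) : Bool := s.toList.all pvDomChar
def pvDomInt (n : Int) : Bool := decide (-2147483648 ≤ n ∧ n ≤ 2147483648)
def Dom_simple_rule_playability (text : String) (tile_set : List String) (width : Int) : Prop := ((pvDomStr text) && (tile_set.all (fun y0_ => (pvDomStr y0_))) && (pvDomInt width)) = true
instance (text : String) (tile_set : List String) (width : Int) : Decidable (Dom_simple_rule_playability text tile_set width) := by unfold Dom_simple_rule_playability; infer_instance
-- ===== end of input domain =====

-- B replaces A's per-column rescans by one fused row-major pass that records ground columns
-- and the first unknown tile while checking widths (objective: alternative single-pass structure).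


-- shared tiny predicates (named so the proofs can treat them atomically)
def keepRow (r : List Char) : Bool := !(PySem.Chars.strip r == [])
def widthOk (width : Int) (r : List Char) : Bool := ((r.length : Int) == width)

-- ===== PORT A =====
-- col_tiles = [rows[r][col] for r in range(len(rows))]  (indices always in range after the width check)
def aColTiles (rows : List (List Char)) (col : Int) : List Char :=
  (PySem.List.pyRange 0 (rows.length) 1).map (fun r =>
    PySem.List.pyGetD (PySem.List.pyGetD rows r []) col ' ')

-- for col in range(width): … early return on the first column without an 'X'
def aColLoop (rows : List (List Char)) : List Int → Option (Bool × String)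
  | [] => none
  | col :: rest =>
    if 'X' ∈ aColTiles rows col then aColLoop rows rest
    else some (false, "no ground in column " ++ PySem.Int.toStr col)

-- for ch in "".join(rows): … early return on the first unknown tile
def aTileLoop (whitelist : PySem.Set String) : List Char → Bool × String
  | [] => (true, "pass")
  | ch :: rest =>
    if PySem.Set.contains whitelist (String.singleton ch) then aTileLoop whitelist rest
    else (false, "unknown tile '" ++ String.singleton ch ++ "'")

def simple_rule_playability (text : String) (tile_set : List String) (width : Int) : Bool × String :=
  let rows := (PySem.Chars.splitlines text.toList).filter keepRow
  let ok_width := rows.all (widthOk width)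
  if !ok_width then (false, "inconsistent width")
  else
    match aColLoop rows (PySem.List.pyRange 0 width 1) with
    | some res => res
    | none => aTileLoop (PySem.Set.ofList tile_set) (PySem.Chars.join [] rows)

-- ===== PORT B =====
-- inner loop of the fused pass: for c, ch in enumerate(r): update ground_cols and bad_tile
def bScanRow (whitelist : PySem.Set String) (st : PySem.Set Int × Option Char) (r : List Char) :
    PySem.Set Int × Option Char :=
  (PySem.List.enumerate r 0).foldl (fun st p =>
    (if p.2 == 'X' then PySem.Set.add st.1 p.1 else st.1,
     if st.2.isNone && !PySem.Set.contains whitelist (String.singleton p.2) then some p.2 else st.2)) st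

-- for col in range(width): first column not in ground_cols
def bColLoop (ground : PySem.Set Int) : List Int → Option (Bool × String)
  | [] => none
  | col :: rest =>
    if PySem.Set.contains ground col then bColLoop ground rest
    else some (false, "no ground in column " ++ PySem.Int.toStr col)

-- the fused row loop (early return on a bad-width row), then the two final checks
def bMain (whitelist : PySem.Set String) (width : Int) :
    List (List Char) → PySem.Set Int × Option Char → Bool × String
  | [], st =>
    match bColLoop st.1 (PySem.List.pyRange 0 width 1) with
    | some res => res
    | none =>
      match st.2 with
      | some ch => (false, "unknown tile '" ++ String.singleton ch ++ "'")
      | none => (true, "pass")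
  | r :: rest, st =>
    if keepRow r then
      if widthOk width r then bMain whitelist width rest (bScanRow whitelist st r)
      else (false, "inconsistent width")
    else bMain whitelist width rest st

def simple_rule_playability_alt (text : String) (tile_set : List String) (width : Int) : Bool × String :=
  bMain (PySem.Set.ofList tile_set) width (PySem.Chars.splitlines text.toList) (PySem.Set.empty, none)

-- ===== PRECONDITION & SPEC =====
def Spec_simple_rule_playability (text : String) (tile_set : List String) (width : Int) (out : Bool × String) : Prop := out = simple_rule_playability_alt text tile_set width
instance (text : String) (tile_set : List String) (width : Int) (out : Bool × String) : Decidable (Spec_simple_rule_playability text tile_set width out) := by unfold Spec_simple_rule_playability; infer_instance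

-- ===== CLAIM (what is proved, stated in full; the proofs are below) =====
def Claim_equal_simple_rule_playability : Prop := ∀ (text : String) (tile_set : List String) (width : Int), Dom_simple_rule_playability text tile_set width → Spec_simple_rule_playability text tile_set width (simple_rule_playability text tile_set width)

-- ===== LEMMAS AND PROOFS =====

-- abbreviations for the two component-wise steps of B's fused scan
def gStep : PySem.Set Int → Int × Char → PySem.Set Int :=
  fun g p => if p.2 == 'X' then PySem.Set.add g p.1 else g

def bStep (whitelist : PySem.Set String) : Option Char → Int × Char → Option Char :=
  fun b p => if b.isNone && !PySem.Set.contains whitelist (String.singleton p.2) then some p.2 else b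

theorem bScanRow_split (W : PySem.Set String) (g : PySem.Set Int) (b : Option Char) (r : List Char) :
    bScanRow W (g, b) r =
      ((PySem.List.enumerate r 0).foldl gStep g, (PySem.List.enumerate r 0).foldl (bStep W) b) := by
  unfold bScanRow gStep bStep
  rw [PySem.List.foldl_prod_mk
       (f := fun g (p : Int × Char) => if p.2 == 'X' then PySem.Set.add g p.1 else g)
       (g := fun b (p : Int × Char) => if b.isNone && !PySem.Set.contains W (String.singleton p.2) then some p.2 else b)]

-- B's row loop = width check over the non-blank rows, then the fused scan of those rows
theorem bMain_unfold (W : PySem.Set String) (width : Int) (lines : List (List Char)) (st : PySem.Set Int × Option Char) :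
    bMain W width lines st =
      (if (lines.filter keepRow).all (widthOk width)
       then bMain W width [] ((lines.filter keepRow).foldl (bScanRow W) st)
       else (false, "inconsistent width")) := by
  induction lines generalizing st with
  | nil => simp [bMain]
  | cons r rest ih =>
    by_cases hs : keepRow r
    · by_cases hw : widthOk width r
      · simp only [bMain, hs, hw, if_true, List.filter_cons, List.all_cons, Bool.true_and, List.foldl_cons]
        exact ih _
      · simp [bMain, hs, hw]
    · simp only [bMain, hs, if_false, Bool.false_eq_true, List.filter_cons]
      exact ih _

-- ground-set membership after folding gStep
theorem mem_foldl_gStep (l : List (Int × Char)) (g : PySem.Set Int) (c : Int) :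
    c ∈ l.foldl gStep g ↔ c ∈ g ∨ ∃ p ∈ l, p.2 = 'X' ∧ p.1 = c := by
  induction l generalizing g with
  | nil => simp
  | cons p t ih =>
    rcases p with ⟨i, c⟩
    by_cases hx : c = 'X'
    · simp only [List.foldl_cons, gStep, hx, BEq.rfl, if_true, ih, PySem.Set.mem_add]
      simp
      tauto
    · have hxb : (c == 'X') = false := by simp [hx]
      simp only [List.foldl_cons, gStep, hxb, Bool.false_eq_true, if_false, ih]
      simp [hx]

theorem mem_foldl_gStep_rows (rows : List (List Char)) (g : PySem.Set Int) (c : Int) :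
    c ∈ rows.foldl (fun g r => (PySem.List.enumerate r 0).foldl gStep g) g ↔
      c ∈ g ∨ ∃ r ∈ rows, ∃ p ∈ PySem.List.enumerate r 0, p.2 = 'X' ∧ p.1 = c := by
  induction rows generalizing g with
  | nil => simp
  | cons r t ih => simp [ih, mem_foldl_gStep, or_assoc]

-- the bad-tile accumulator is "first kept": on one row…
theorem foldl_bStep_row (W : PySem.Set String) (r : List Char) :
    ∀ (s : Int) (b : Option Char),
      (PySem.List.enumerate r s).foldl (bStep W) b =
        b.or (r.find? (fun ch => !PySem.Set.contains W (String.singleton ch))) := by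
  induction r with
  | nil => intro s b; simp [PySem.List.enumerate_nil]
  | cons ch t ih =>
    intro s b
    rw [PySem.List.enumerate_cons, List.foldl_cons, ih]
    cases b with
    | some v => simp [bStep]
    | none =>
      by_cases hch : String.singleton ch ∈ W
      · simp [bStep, hch]
      · simp [bStep, hch]

-- …and across all rows it is the first bad char of the concatenation
theorem foldl_bStep_rows (W : PySem.Set String) (rows : List (List Char)) (b : Option Char) :
    rows.foldl (fun b r => (PySem.List.enumerate r 0).foldl (bStep W) b) b =
      b.or (rows.flatten.find? (fun ch => !PySem.Set.contains W (String.singleton ch))) := by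
  induction rows generalizing b with
  | nil => simp
  | cons r t ih =>
    rw [List.foldl_cons, foldl_bStep_row, ih]
    simp [List.find?_append, Option.or_assoc]

-- the two column loops agree when the predicates agree on the traversed columns
theorem colLoop_congr (rows : List (List Char)) (ground : PySem.Set Int) (cols : List Int)
    (h : ∀ col ∈ cols, ('X' ∈ aColTiles rows col ↔ col ∈ ground)) :
    aColLoop rows cols = bColLoop ground cols := by
  induction cols with
  | nil => rfl
  | cons col rest ih =>
    have hcol := h col (by simp)
    by_cases hx : 'X' ∈ aColTiles rows col
    · have hg : col ∈ ground := hcol.mp hx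
      simp [aColLoop, bColLoop, hx, hg, ih (fun c hc => h c (by simp [hc]))]
    · have hg : col ∉ ground := fun hh => hx (hcol.mpr hh)
      simp [aColLoop, bColLoop, hx, hg]

-- A's tile loop is a find? over the joined characters
theorem aTileLoop_eq_find (W : PySem.Set String) (chars : List Char) :
    aTileLoop W chars =
      match chars.find? (fun ch => !PySem.Set.contains W (String.singleton ch)) with
      | some ch => (false, "unknown tile '" ++ String.singleton ch ++ "'")
      | none => (true, "pass") := by
  induction chars with
  | nil => rfl
  | cons ch t ih =>
    by_cases hch : String.singleton ch ∈ W
    · simp [aTileLoop, hch, ih]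
    · simp [aTileLoop, hch]

-- membership in enumerate (PySem.List.enumerate is structural; no library lemma states this)
theorem mem_enumerate_iff (r : List Char) : ∀ (s : Int) (p : Int × Char),
    p ∈ PySem.List.enumerate r s ↔ ∃ (i : Nat) (h : i < r.length), p = (s + i, r[i]'h) := by
  induction r with
  | nil => intro s p; simp [PySem.List.enumerate_nil]
  | cons c t ih =>
    intro s p
    rw [PySem.List.enumerate_cons, List.mem_cons, ih]
    constructor
    · rintro (rfl | ⟨i, h, rfl⟩)
      · exact ⟨0, by simp, by simp⟩
      · refine ⟨i + 1, by simpa using Nat.succ_lt_succ h, ?_⟩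
        simp only [List.getElem_cons_succ, Prod.mk.injEq]
        exact ⟨by push_cast; ring, trivial⟩
    · rintro ⟨i, h, rfl⟩
      cases i with
      | zero => left; simp
      | succ j =>
        right
        refine ⟨j, ?_, ?_⟩
        · simp only [List.length_cons] at h; omega
        · simp only [List.getElem_cons_succ, Prod.mk.injEq]
          exact ⟨by push_cast; ring, trivial⟩

theorem join_nil_eq_flatten (rows : List (List Char)) : PySem.Chars.join [] rows = rows.flatten := by
  induction rows with
  | nil => rfl
  | cons r t ih =>
    cases t with
    | nil => simp [PySem.Chars.join, List.intercalate]
    | cons s u => simp_all [PySem.Chars.join, List.intercalate, List.intersperse]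

-- under the width check, 'X' in A's column col ↔ col is in B's ground set
theorem col_pred_agree (rows : List (List Char)) (width col : Int)
    (hw : ∀ r ∈ rows, (r.length : Int) = width) (h0 : 0 ≤ col) (h1 : col < width) :
    'X' ∈ aColTiles rows col ↔
      col ∈ rows.foldl (fun g r => (PySem.List.enumerate r 0).foldl gStep g) PySem.Set.empty := by
  rw [mem_foldl_gStep_rows]
  simp only [PySem.Set.empty]
  constructor
  · intro hx
    simp only [aColTiles, List.mem_map] at hx
    obtain ⟨r, hr, hval⟩ := hx
    rw [PySem.List.mem_pyRange_one] at hr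
    obtain ⟨hr0, hr1⟩ := hr
    have hrn : r.toNat < rows.length := by omega
    rw [PySem.List.pyGetD_eq_getElem rows [] hr0 (by exact_mod_cast hr1)] at hval
    set row := rows[r.toNat] with hrow
    have hmem : row ∈ rows := by exact List.getElem_mem hrn
    have hlen : (row.length : Int) = width := hw row hmem
    have hcl : col.toNat < row.length := by omega
    rw [PySem.List.pyGetD_eq_getElem row ' ' h0 (by omega)] at hval
    refine Or.inr ⟨row, hmem, (col, row[col.toNat]), ?_, hval, rfl⟩
    rw [mem_enumerate_iff]
    exact ⟨col.toNat, hcl, by simp [Int.toNat_of_nonneg h0]⟩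
  · rintro (h | ⟨row, hmem, p, hp, hX, hc⟩)
    · exact absurd h (List.not_mem_nil)
    · rw [mem_enumerate_iff] at hp
      obtain ⟨i, hi, hpe⟩ := hp
      obtain ⟨j, hj, hrow⟩ := List.mem_iff_getElem.mp hmem
      simp only [aColTiles, List.mem_map]
      refine ⟨(j : Int), ?_, ?_⟩
      · rw [PySem.List.mem_pyRange_one]; constructor <;> [positivity; exact_mod_cast hj]
      · rw [PySem.List.pyGetD_eq_getElem rows [] (by positivity) (by exact_mod_cast hj)]
        have hcl : col.toNat < rows[(j:Int).toNat].length := by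
          have := hw rows[(j:Int).toNat] (List.getElem_mem (by simpa using hj))
          omega
        rw [PySem.List.pyGetD_eq_getElem _ ' ' h0 (by omega)]
        subst hpe
        have : i = col.toNat := by omega
        subst this
        simp only [Int.toNat_natCast] at *
        rw [← hX]
        congr 1

-- ===== VERDICT (by name: the statement is the Claim_ definition above) =====
theorem simple_rule_playability_spec : Claim_equal_simple_rule_playability := by
  intro text tile_set width _
  unfold Spec_simple_rule_playability simple_rule_playability simple_rule_playability_alt
  set W := PySem.Set.ofList tile_set with hW
  set rows := (PySem.Chars.splitlines text.toList).filter keepRow with hrows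
  rw [bMain_unfold]
  by_cases hall : rows.all (widthOk width)
  · simp only [← hrows, hall, if_true, Bool.not_true]
    have hw : ∀ r ∈ rows, (r.length : Int) = width := by
      intro r hr
      have := List.all_eq_true.mp hall r hr
      unfold widthOk at this
      exact_mod_cast (beq_iff_eq).mp this
    -- split the fused scan into its two accumulators
    have hsplit : rows.foldl (bScanRow W) (PySem.Set.empty, none) =
        (rows.foldl (fun g r => (PySem.List.enumerate r 0).foldl gStep g) PySem.Set.empty,
         rows.foldl (fun b r => (PySem.List.enumerate r 0).foldl (bStep W) b) none) := by
      generalize PySem.Set.empty = g0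
      generalize (none : Option Char) = b0
      induction rows generalizing g0 b0 with
      | nil => rfl
      | cons r t ih => rw [List.foldl_cons, bScanRow_split, List.foldl_cons, List.foldl_cons, ih]
    rw [hsplit]
    set ground := rows.foldl (fun g r => (PySem.List.enumerate r 0).foldl gStep g) PySem.Set.empty with hg
    have hcols : aColLoop rows (PySem.List.pyRange 0 width 1) = bColLoop ground (PySem.List.pyRange 0 width 1) := by
      apply colLoop_congr
      intro col hc
      rw [PySem.List.mem_pyRange_one] at hc
      exact col_pred_agree rows width col hw hc.1 hc.2
    cases hres : bColLoop ground (PySem.List.pyRange 0 width 1) with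
    | some res =>
      have hA : aColLoop rows (PySem.List.pyRange 0 width 1) = some res := by rw [hcols, hres]
      simp [bMain, hA, hres]
    | none =>
      have hA : aColLoop rows (PySem.List.pyRange 0 width 1) = none := by rw [hcols, hres]
      simp only [bMain, hA, hres, Bool.false_eq_true, if_false]
      rw [foldl_bStep_rows, aTileLoop_eq_find, join_nil_eq_flatten]
      simp only [Option.none_or]
  · simp [← hrows, hall]
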